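-- pv_equiv track=rewrite | github.com/WithoutHaste/RecreationalMath | pythonGenerators/generate_bell.py | generate_bell
-- ===== SOURCE A (Python) =====
-- def generate_bell(max):
-- 	""" Returns an array of bell numbers from 1 to max """
--
-- 	if max <= 0:
-- 		raise Exception('generate_bell requires a positive integer')
--
-- 	is_bell = []
-- 	for n in range(max+1):
-- 		if n < 1:
-- 			continue
-- 		number_of_ways = number_of_ways_n_can_be_partitioned(n)
-- 		if number_of_ways > max:
-- 			break
-- 		is_bell.append(number_of_ways)
--
-- 	return is_bell
--
-- def number_of_ways_n_can_be_partitioned(n):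
-- 	"""
-- 	can I linearly iterate through all unique possible partitions?
-- 	n = 4, elements = a,b,c,d
-- 	partitions:
-- 	all separate a,b,c,d
-- 	two together (a,b),c,d | a,(b,c),d | a,b,(c,d) | (a,c),b,d | a,c,(b,d) | (a,d),b,c | (a,b),(c,d) | (a,c),(b,d) | (a,d),(b,c)
-- 	three together (a,b,c),d | a,(b,c,d) | (a,c,d),b | (a,b,d),c
-- 	all together (a,b,c,d)
--
-- 	order does matter here, unlike with partitions
--
-- 	can I start with the partitions and then calculate permutations from there?
-- 		like (a,a,a),a => (a,b,c),d | a,(b,c,d) | (a,c,d),b | (a,b,d),c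
-- 		1 becomes 4
--
-- 	can I use set-number like this?
-- 	(a,b,c),d => [1,1,1,2]
-- 	with lowest set number always being first, so that there is no double-counting of (a,b) vs (b,a)
-- 	so the rule would be "first instance of each set-number in array is in ascending order"
-- 	then I find all possible set-number arrays?
-- 		for arrays [1,1,1,1]...[1,2,3,4] count all possible arrangements that follow the rule?
-- 		let's try that
-- 	"""
-- 	permutation = [1] * n
-- 	number_of_permutations = 1 #starting at 1 for the current permutation, which is valid
-- 	while increment_permutation(n, permutation):
-- 		number_of_permutations = number_of_permutations + 1
-- 	return number_of_permutations
--
-- def increment_permutation(n, permutation):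
-- 	increment_permutation_at_i(0, n, permutation)
-- 	while permutation_is_invalid(permutation):
-- 		increment_permutation_at_i(0, n, permutation)
-- 	return sum(permutation) != len(permutation) # all 1s when we loop back around to the beginning
--
-- def increment_permutation_at_i(i, n, permutation):
-- 	if i >= len(permutation):
-- 		return
-- 	permutation[i] = permutation[i] + 1
-- 	if permutation[i] > n:
-- 		permutation[i] = 1
-- 		increment_permutation_at_i(i+1, n, permutation)
--
-- def permutation_is_invalid(permutation):
-- 	""" returns True if the first-instances of each value are not in ascending order """
-- 	""" also, cannot skip any set-indexes, so need numbers 1..x """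
-- 	first_instances = []
-- 	for val in permutation:
-- 		if val not in first_instances:
-- 			if len(first_instances) == 0 and val != 1:
-- 				return True
-- 			if len(first_instances) > 0 and val != first_instances[-1] + 1:
-- 				return True
-- 			first_instances.append(val)
-- 	return False
-- ===== SOURCE B (Python) =====
-- def _bell(n):
--     """Bell(n) = number of restricted-growth strings of length n, by an
--     O(n^2) dynamic programme over (remaining length, current max block index)."""
--     row = [1] * n                  # row[m-1] = ways to extend by 0 elements with current max m
--     for i in range(1, n):
--         row = [m * row[m - 1] + row[m] for m in range(1, n - i + 1)]
--     return row[0]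
--
--
-- def generate_bell(max):
--     """ Returns an array of bell numbers from 1 to max """
--     result = []
--     n = 1
--     while n <= max:
--         b = _bell(n)
--         if b > max:
--             break
--         result.append(b)
--         n += 1
--     return result
-- ===== Notes on version B (the rewrite author's own statement) =====
-- stated objective: faster
-- what changed: A counts set partitions of n by enumerating all n^n candidate strings with a hand-rolled odometer and validity scan; B computes each Bell number by an O(n^2) dynamic programme over (remaining length, current maximal block index) of restricted-growth strings, keeping the same outer stop-when->max loop.
-- outside the precondition, e.g. on generate_bell(0): A raises Exception, B returns []
import Mathlib
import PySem

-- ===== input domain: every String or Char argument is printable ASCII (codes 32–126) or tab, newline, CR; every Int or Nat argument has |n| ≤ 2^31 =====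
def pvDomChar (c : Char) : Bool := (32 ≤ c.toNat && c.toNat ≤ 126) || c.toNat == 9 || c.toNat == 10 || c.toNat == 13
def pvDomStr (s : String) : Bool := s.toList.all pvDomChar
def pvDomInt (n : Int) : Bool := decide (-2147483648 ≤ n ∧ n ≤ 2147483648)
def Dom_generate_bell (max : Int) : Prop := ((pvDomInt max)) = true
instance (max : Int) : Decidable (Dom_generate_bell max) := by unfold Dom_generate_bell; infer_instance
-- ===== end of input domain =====

-- B replaces A's per-term enumeration of all n^n candidate partition strings by a
-- dynamic programme over restricted-growth strings (objective: faster).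

-- ===== PORT A =====
def pvIncAt (n : Int) : List Int → List Int
  | [] => []
  | x :: xs => if x + 1 > n then 1 :: pvIncAt n xs else (x + 1) :: xs

def pvInvGo (fi : List Int) : List Int → Bool
  | [] => false
  | v :: vs =>
    if fi.contains v then pvInvGo fi vs
    else if fi.isEmpty then (if v ≠ 1 then true else pvInvGo (fi ++ [v]) vs)
    else if v ≠ fi.getLastD 0 + 1 then true
    else pvInvGo (fi ++ [v]) vs

def pvIsInvalid (perm : List Int) : Bool := pvInvGo [] perm

def pvIncWhile (n : Int) : ℕ → List Int → List Int
  | 0, p => p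
  | fuel + 1, p => if pvIsInvalid p then pvIncWhile n fuel (pvIncAt n p) else p

def pvIncPerm (n : Int) (fuel : ℕ) (p : List Int) : List Int × Bool :=
  let q := pvIncWhile n fuel (pvIncAt n p)
  (q, decide (q.sum ≠ (q.length : Int)))

def pvWaysLoop (n : Int) (ifuel : ℕ) : ℕ → Int → List Int → Int
  | 0, cnt, _ => cnt
  | fuel + 1, cnt, p =>
    let r := pvIncPerm n ifuel p
    if r.2 then pvWaysLoop n ifuel fuel (cnt + 1) r.1 else cnt

def pvFuel (n : Int) : ℕ := n.toNat ^ n.toNat + 1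

def pvWays (n : Int) : Int := pvWaysLoop n (pvFuel n) (pvFuel n) 1 (List.replicate n.toNat 1)

def pvGoA (max : Int) : List Int → List Int → List Int
  | [], acc => acc
  | n :: ns, acc =>
    if n < 1 then pvGoA max ns acc
    else
      let w := pvWays n
      if w > max then acc else pvGoA max ns (acc ++ [w])

def generate_bell (max : Int) : List Int :=
  pvGoA max (PySem.List.pyRange 0 (max + 1) 1) []

-- ===== PORT B =====
def pvBellRow (n : Int) : List Int :=
  (PySem.List.pyRange 1 n 1).foldl
    (fun row i =>
      (PySem.List.pyRange 1 (n - i + 1) 1).map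
        (fun m => m * (PySem.List.pyGetD row (m - 1) 0) + PySem.List.pyGetD row m 0))
    (List.replicate n.toNat 1)

def pvBell (n : Int) : Int := PySem.List.pyGetD (pvBellRow n) 0 0

def pvGoB (max : Int) (n : Int) (acc : List Int) : List Int :=
  if n ≤ max then
    let b := pvBell n
    if b > max then acc else pvGoB max (n + 1) (acc ++ [b])
  else acc
termination_by (max + 1 - n).toNat
decreasing_by omega

def generate_bell_alt (max : Int) : List Int := pvGoB max 1 []

-- ===== PRECONDITION & SPEC =====
-- Pre_ excludes exactly max ≤ 0, where Python A raises Exception('generate_bell requires a positive integer').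
def Pre_generate_bell (max : Int) : Prop := 1 ≤ max
instance (max : Int) : Decidable (Pre_generate_bell max) := by unfold Pre_generate_bell; infer_instance
def pvWitness_generate_bell : Int := (3)

def Spec_generate_bell (max : Int) (out : List Int) : Prop := out = generate_bell_alt max
instance (max : Int) (out : List Int) : Decidable (Spec_generate_bell max out) := by unfold Spec_generate_bell; infer_instance

-- ===== CLAIM (what is proved, stated in full; the proofs are below) =====
def Claim_equal_generate_bell : Prop := ∀ (max : Int), Dom_generate_bell max → Pre_generate_bell max → Spec_generate_bell max (generate_bell max)

-- ===== LEMMAS AND PROOFS =====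
def pvOfVal (N : ℕ) : ℕ → ℕ → List Int
  | 0, _ => []
  | k+1, v => (((v % N : ℕ) : ℤ) + 1) :: pvOfVal N k (v / N)

def pvSval : ℕ → List Int → Bool
  | _, [] => true
  | m, v :: vs =>
    if 1 ≤ v ∧ v ≤ (m : ℤ) then pvSval m vs
    else if v = (m : ℤ) + 1 then pvSval (m+1) vs else false

def pvFiList (m : ℕ) : List Int := (List.range m).map (fun i => ((i : ℤ) + 1))

theorem pvOfVal_zero (N k : ℕ) (hN : 0 < N) : pvOfVal N k 0 = List.replicate k 1 := by
  induction k with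
  | zero => rfl
  | succ k ih => simp [pvOfVal, Nat.zero_mod, Nat.zero_div, ih, List.replicate_succ]

theorem pvOfVal_length (N k v : ℕ) : (pvOfVal N k v).length = k := by
  induction k generalizing v with
  | zero => rfl
  | succ k ih => simp [pvOfVal, ih]

theorem pvIncAt_ofVal (N : ℕ) (hN : 0 < N) :
    ∀ (k v : ℕ), v < N ^ k →
      pvIncAt (N : ℤ) (pvOfVal N k v) = pvOfVal N k ((v + 1) % N ^ k) := by
  intro k
  induction k with
  | zero =>
    intro v hv
    have : v = 0 := by simpa using hv
    subst this; rfl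
  | succ k ih =>
    intro v hv
    have hqr : N * (v / N) + v % N = v := Nat.div_add_mod v N
    have hr : v % N < N := Nat.mod_lt v hN
    by_cases hd : v % N + 1 < N
    · -- no carry
      have h1 : ¬ (((v % N : ℕ) : ℤ) + 1 + 1 > (N : ℤ)) := by push_cast; omega
      have hm : (v + 1) % N = v % N + 1 := by
        conv_lhs => rw [← hqr]
        rw [Nat.add_assoc, Nat.mul_add_mod]
        exact Nat.mod_eq_of_lt hd
      have hlt : v + 1 < N ^ (k+1) := by
        rcases Nat.lt_or_ge (v+1) (N ^ (k+1)) with h | h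
        · exact h
        · exfalso
          have he : v + 1 = N ^ (k+1) := by omega
          have : (v + 1) % N = 0 := by
            rw [he, pow_succ, Nat.mul_mod_left]
          omega
      have hdv : (v + 1) / N = v / N := by
        conv_lhs => rw [← hqr]
        rw [Nat.add_assoc, Nat.mul_add_div hN]
        rw [Nat.div_eq_of_lt hd, Nat.add_zero]
      rw [Nat.mod_eq_of_lt hlt]
      simp only [pvOfVal, pvIncAt, if_neg h1, hm, hdv]
      push_cast; ring_nf
    · -- carry
      have hr1 : v % N = N - 1 := by omega
      have h1 : (((v % N : ℕ) : ℤ) + 1 + 1 > (N : ℤ)) := by push_cast; omega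
      have hq : v / N < N ^ k := by
        rw [Nat.div_lt_iff_lt_mul hN]
        calc v < N ^ (k+1) := hv
        _ = N ^ k * N := pow_succ N k
      have hv1 : v + 1 = N * (v / N + 1) := by
        have hx : N * (v / N + 1) = N * (v / N) + N := by ring
        omega
      have hmod : (v + 1) % N ^ (k+1) = N * ((v / N + 1) % N ^ k) := by
        rw [hv1, pow_succ', Nat.mul_mod_mul_left]
      rw [hmod]
      simp only [pvOfVal, pvIncAt, if_pos h1]
      rw [Nat.mul_mod_right, Nat.mul_div_cancel_left _ hN]
      simp only [Nat.cast_zero, zero_add]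
      rw [ih _ hq]

theorem pvOfVal_sum_ge (N : ℕ) : ∀ (k v : ℕ), (k : ℤ) ≤ (pvOfVal N k v).sum := by
  intro k
  induction k with
  | zero => intro v; simp [pvOfVal]
  | succ k ih =>
    intro v
    have := ih (v / N)
    simp only [pvOfVal, List.sum_cons]
    have : (0:ℤ) ≤ ((v % N : ℕ) : ℤ) := by positivity
    push_cast
    push_cast at ih
    have h2 := ih (v / N)
    omega

theorem pvOfVal_sum_eq_iff (N : ℕ) (hN : 0 < N) :
    ∀ (k v : ℕ), v < N ^ k → ((pvOfVal N k v).sum = (k : ℤ) ↔ v = 0) := by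
  intro k
  induction k with
  | zero =>
    intro v hv
    have : v = 0 := by simpa using hv
    subst this; simp [pvOfVal]
  | succ k ih =>
    intro v hv
    constructor
    · intro h
      have hq : v / N < N ^ k := by
        rw [Nat.div_lt_iff_lt_mul hN]
        calc v < N ^ (k+1) := hv
        _ = N ^ k * N := pow_succ N k
      have hge := pvOfVal_sum_ge N k (v / N)
      have hiff := ih (v / N) hq
      have hqr : N * (v / N) + v % N = v := Nat.div_add_mod v N
      simp only [pvOfVal, List.sum_cons] at h
      push_cast at h
      have h1 : (pvOfVal N k (v / N)).sum = (k : ℤ) := by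
        have hnn : (0:ℤ) ≤ ((v % N : ℕ) : ℤ) := by positivity
        push_cast at h ⊢
        omega
      have h2 : v / N = 0 := hiff.mp h1
      have h3 : ((v % N : ℕ) : ℤ) = 0 := by rw [h1] at h; push_cast at h ⊢; omega
      have h4 : v % N = 0 := by exact_mod_cast h3
      rw [h2, h4, Nat.mul_zero] at hqr
      omega
    · intro h; subst h
      rw [pvOfVal_zero _ _ hN]
      simp

theorem pvFiList_contains (m : ℕ) (v : Int) :
    (pvFiList m).contains v = true ↔ 1 ≤ v ∧ v ≤ (m : ℤ) := by
  simp [pvFiList]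
  constructor
  · rintro ⟨i, hi, rfl⟩; push_cast; omega
  · intro ⟨h1, h2⟩
    refine ⟨(v - 1).toNat, by omega, by omega⟩

theorem pvFiList_succ (m : ℕ) : pvFiList m ++ [((m : ℤ) + 1)] = pvFiList (m + 1) := by
  simp [pvFiList, List.range_succ]

theorem pvFiList_getLastD (m : ℕ) (hm : 0 < m) : (pvFiList m).getLastD 0 = (m : ℤ) := by
  obtain ⟨k, rfl⟩ := Nat.exists_eq_add_of_lt hm
  rw [← pvFiList_succ]
  simp

theorem pvInvGo_fiList : ∀ (l : List Int) (m : ℕ), pvInvGo (pvFiList m) l = !pvSval m l := by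
  intro l
  induction l with
  | nil => intro m; simp [pvInvGo, pvSval]
  | cons v vs ih =>
    intro m
    by_cases hc : 1 ≤ v ∧ v ≤ (m : ℤ)
    · have : (pvFiList m).contains v = true := (pvFiList_contains m v).mpr hc
      simp only [pvInvGo, pvSval, this, if_pos hc, if_true]
      exact ih m
    · have hnc : ¬ ((pvFiList m).contains v = true) := by
        rw [pvFiList_contains]; exact hc
      rcases Nat.eq_zero_or_pos m with hm | hm
      · subst hm
        have he : (pvFiList 0).isEmpty = true := by simp [pvFiList]
        simp only [pvInvGo, pvSval, if_neg hnc, he, if_pos, if_neg hc]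
        by_cases hv1 : v = 1
        · subst hv1
          have : pvFiList 0 ++ [(1:ℤ)] = pvFiList 1 := by simpa using pvFiList_succ 0
          simp only [if_neg (by simp : ¬ (1:ℤ) ≠ 1), this, ih 1]
          norm_num
        · simp [hv1]
      · have hlen : (pvFiList m).length = m := by simp [pvFiList]
        have he : ¬ ((pvFiList m).isEmpty = true) := by
          intro hcon
          rw [List.isEmpty_iff] at hcon
          rw [hcon] at hlen
          simp at hlen
          omega
        simp only [pvInvGo, pvSval, if_neg hnc, if_neg he, pvFiList_getLastD m hm, if_neg hc]
        by_cases hv1 : v = (m : ℤ) + 1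
        · subst hv1
          rw [if_neg (by simp), if_pos rfl, pvFiList_succ, ih (m+1)]
        · rw [if_pos hv1, if_neg hv1]
          rfl

theorem pvIsInvalid_eq (l : List Int) : pvIsInvalid l = !pvSval 0 l := by
  have : pvFiList 0 = [] := by simp [pvFiList]
  rw [pvIsInvalid, ← this, pvInvGo_fiList]

theorem pvSval_replicate_pos (k : ℕ) : ∀ m, 0 < m → pvSval m (List.replicate k 1) = true := by
  induction k with
  | zero => intro m _; rfl
  | succ k ih =>
    intro m hm
    simp only [List.replicate_succ, pvSval]
    rw [if_pos ⟨by norm_num, by exact_mod_cast hm⟩]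
    exact ih m hm

theorem pvSval_replicate (k m : ℕ) : pvSval m (List.replicate k 1) = true := by
  rcases Nat.eq_zero_or_pos m with hm | hm
  · subst hm
    cases k with
    | zero => rfl
    | succ k =>
      simp only [List.replicate_succ, pvSval]
      rw [if_neg (by norm_num), if_pos (by norm_num)]
      exact pvSval_replicate_pos k 1 (by omega)
  · exact pvSval_replicate_pos k m hm

def pvFirst (N : ℕ) : ℕ → ℕ → ℕ
  | 0, _ => 0
  | d + 1, i => if pvSval 0 (pvOfVal N N i) = true then i else pvFirst N d (i + 1)

theorem pvFirst_spec (N : ℕ) :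
    ∀ (d i : ℕ), 1 ≤ i →
      (pvFirst N d i = 0 ∧ ∀ m, i ≤ m → m < i + d → ¬ pvSval 0 (pvOfVal N N m) = true)
      ∨ (i ≤ pvFirst N d i ∧ pvFirst N d i < i + d ∧
         pvSval 0 (pvOfVal N N (pvFirst N d i)) = true ∧
         ∀ m, i ≤ m → m < pvFirst N d i → ¬ pvSval 0 (pvOfVal N N m) = true) := by
  intro d
  induction d with
  | zero => intro i hi; left; exact ⟨rfl, fun m h1 h2 => by omega⟩
  | succ d ih =>
    intro i hi
    by_cases hv : pvSval 0 (pvOfVal N N i) = true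
    · right
      rw [pvFirst, if_pos hv]
      exact ⟨le_refl i, by omega, hv, fun m h1 h2 => by omega⟩
    · rw [pvFirst, if_neg hv]
      rcases ih (i + 1) (by omega) with ⟨h0, hall⟩ | ⟨h1, h2, h3, h4⟩
      · left
        refine ⟨h0, fun m hm1 hm2 => ?_⟩
        rcases Nat.eq_or_lt_of_le hm1 with rfl | hlt
        · exact hv
        · exact hall m (by omega) (by omega)
      · right
        refine ⟨by omega, by omega, h3, fun m hm1 hm2 => ?_⟩
        rcases Nat.eq_or_lt_of_le hm1 with rfl | hlt
        · exact hv
        · exact h4 m (by omega) hm2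

theorem pvScan (N : ℕ) (hN : 0 < N) :
    ∀ (fuel i : ℕ), i ≤ N ^ N → N ^ N + 1 - i ≤ fuel →
      pvIncWhile (N : ℤ) fuel (pvOfVal N N (i % N ^ N)) =
        pvOfVal N N (pvFirst N (N ^ N - i) i) := by
  intro fuel
  induction fuel with
  | zero => intro i hi hf; omega
  | succ fuel ih =>
    intro i hi hf
    have hNN : 0 < N ^ N := pow_pos hN N
    by_cases hieq : i = N ^ N
    · subst hieq
      rw [Nat.mod_self, Nat.sub_self]
      have hval : pvSval 0 (pvOfVal N N 0) = true := by
        rw [pvOfVal_zero _ _ hN]; exact pvSval_replicate N 0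
      have hinv : pvIsInvalid (pvOfVal N N 0) = false := by
        rw [pvIsInvalid_eq, hval]; rfl
      rw [pvIncWhile, hinv]
      rfl
    · have hilt : i < N ^ N := by omega
      rw [Nat.mod_eq_of_lt hilt]
      obtain ⟨d, hd⟩ : ∃ d, N ^ N - i = d + 1 := ⟨N ^ N - i - 1, by omega⟩
      rw [hd]
      by_cases hvd : pvSval 0 (pvOfVal N N i) = true
      · have hinv : pvIsInvalid (pvOfVal N N i) = false := by
          rw [pvIsInvalid_eq, hvd]; rfl
        rw [pvIncWhile, hinv]
        simp only [Bool.false_eq_true, if_false]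
        rw [pvFirst, if_pos hvd]
      · have hinv : pvIsInvalid (pvOfVal N N i) = true := by
          rw [pvIsInvalid_eq, Bool.eq_false_iff.mpr hvd]; rfl
        rw [pvIncWhile, hinv]
        simp only [if_pos rfl]
        rw [pvIncAt_ofVal N hN N i hilt]
        rw [ih (i + 1) (by omega) (by omega)]
        rw [pvFirst, if_neg hvd]
        have hde : N ^ N - (i + 1) = d := by omega
        rw [hde]
        simp

theorem pvCount (N : ℕ) (hN : 0 < N) :
    ∀ (fuel : ℕ) (cnt : ℤ) (j : ℕ), j < N ^ N → N ^ N - j ≤ fuel →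
      pvWaysLoop (N : ℤ) (N ^ N + 1) fuel cnt (pvOfVal N N j) =
        cnt + ((Finset.Ioo j (N ^ N)).filter
                 (fun m => pvSval 0 (pvOfVal N N m) = true)).card := by
  intro fuel
  induction fuel with
  | zero => intro cnt j hj hf; omega
  | succ fuel ih =>
    intro cnt j hj hf
    have hNN : 0 < N ^ N := pow_pos hN N
    have hq : pvIncWhile (N : ℤ) (N ^ N + 1) (pvIncAt (N : ℤ) (pvOfVal N N j)) =
        pvOfVal N N (pvFirst N (N ^ N - (j + 1)) (j + 1)) := by
      rw [pvIncAt_ofVal N hN N j hj]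
      have := pvScan N hN (N ^ N + 1) (j + 1) (by omega) (by omega)
      exact this
    set m₀ := pvFirst N (N ^ N - (j + 1)) (j + 1) with hm₀
    have hlen : ((pvOfVal N N m₀).length : ℤ) = (N : ℤ) := by rw [pvOfVal_length]
    rcases pvFirst_spec N (N ^ N - (j + 1)) (j + 1) (by omega) with ⟨h0, hall⟩ | ⟨h1, h2, h3, h4⟩
    · -- wrapped around: loop stops
      have hsum : (pvOfVal N N m₀).sum = ((pvOfVal N N m₀).length : ℤ) := by
        rw [hlen, ← hm₀] at *
        rw [h0]
        exact (pvOfVal_sum_eq_iff N hN N 0 hNN).mpr rfl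
      have hb : decide ((pvOfVal N N m₀).sum ≠ ((pvOfVal N N m₀).length : Int)) = false := by
        simp [hsum]
      rw [pvWaysLoop]
      simp only [pvIncPerm, hq, hb, if_false]
      have hcard : ((Finset.Ioo j (N ^ N)).filter
          (fun m => pvSval 0 (pvOfVal N N m) = true)).card = 0 := by
        rw [Finset.card_eq_zero]
        ext m
        simp only [Finset.mem_filter, Finset.mem_Ioo, Finset.notMem_empty, iff_false]
        rintro ⟨⟨hm1, hm2⟩, hm3⟩
        exact hall m (by omega) (by omega) hm3
      rw [hcard]
      simp
    · -- found next valid tuple m₀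
      have hm0lt : m₀ < N ^ N := by omega
      have hm0ne : m₀ ≠ 0 := by omega
      have hsum : (pvOfVal N N m₀).sum ≠ ((pvOfVal N N m₀).length : ℤ) := by
        rw [hlen]
        intro hcon
        exact hm0ne ((pvOfVal_sum_eq_iff N hN N m₀ hm0lt).mp hcon)
      have hb : decide ((pvOfVal N N m₀).sum ≠ ((pvOfVal N N m₀).length : Int)) = true := by
        simpa using hsum
      rw [pvWaysLoop]
      simp only [pvIncPerm, hq, hb, if_true]
      rw [ih (cnt + 1) m₀ hm0lt (by omega)]
      have hins : (Finset.Ioo j (N ^ N)).filter (fun m => pvSval 0 (pvOfVal N N m) = true) =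
          insert m₀ ((Finset.Ioo m₀ (N ^ N)).filter (fun m => pvSval 0 (pvOfVal N N m) = true)) := by
        ext x
        simp only [Finset.mem_filter, Finset.mem_Ioo, Finset.mem_insert]
        constructor
        · rintro ⟨⟨hx1, hx2⟩, hx3⟩
          rcases Nat.lt_or_ge x m₀ with hlt | hge
          · exact absurd hx3 (h4 x (by omega) hlt)
          · rcases Nat.eq_or_lt_of_le hge with rfl | hgt
            · exact Or.inl rfl
            · exact Or.inr ⟨⟨hgt, hx2⟩, hx3⟩
        · rintro (rfl | ⟨⟨hx1, hx2⟩, hx3⟩)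
          · exact ⟨⟨by omega, hm0lt⟩, h3⟩
          · exact ⟨⟨by omega, hx2⟩, hx3⟩
      rw [hins, Finset.card_insert_of_notMem (by simp)]
      push_cast
      ring

def pvCnt (N i m : ℕ) : ℕ :=
  ((Finset.range (N ^ i)).filter (fun v => pvSval m (pvOfVal N i v) = true)).card

theorem pvWays_eq_cnt (n : Int) (h : 1 ≤ n) : pvWays n = (pvCnt n.toNat n.toNat 0 : ℤ) := by
  set N := n.toNat with hNdef
  have hN : 0 < N := by omega
  have hNN : 0 < N ^ N := pow_pos hN N
  have hcast : n = (N : ℤ) := by omega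
  rw [pvWays, pvFuel, hcast]
  simp only [Int.toNat_natCast]
  rw [← pvOfVal_zero N N hN]
  rw [pvCount N hN (N ^ N + 1) 1 0 hNN (by omega)]
  have hins : (Finset.range (N ^ N)).filter (fun v => pvSval 0 (pvOfVal N N v) = true) =
      insert 0 ((Finset.Ioo 0 (N ^ N)).filter (fun m => pvSval 0 (pvOfVal N N m) = true)) := by
    ext x
    simp only [Finset.mem_filter, Finset.mem_range, Finset.mem_Ioo, Finset.mem_insert]
    constructor
    · rintro ⟨hx1, hx2⟩
      rcases Nat.eq_zero_or_pos x with rfl | hx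
      · exact Or.inl rfl
      · exact Or.inr ⟨⟨hx, hx1⟩, hx2⟩
    · rintro (rfl | ⟨⟨hx1, hx2⟩, hx3⟩)
      · refine ⟨hNN, ?_⟩
        rw [pvOfVal_zero N N hN]
        exact pvSval_replicate N 0
      · exact ⟨hx2, hx3⟩
  rw [pvCnt, hins, Finset.card_insert_of_notMem (by simp)]
  push_cast
  ring

def pvFB : ℕ → ℕ → ℤ
  | 0, _ => 1
  | i + 1, m => m * pvFB i m + pvFB i (m + 1)

theorem pvBlockSum (N : ℕ) (hN : 0 < N) (g : ℕ → ℕ → ℕ) :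
    ∀ (M : ℕ), ∑ v ∈ Finset.range (N * M), g (v % N) (v / N) =
      ∑ w ∈ Finset.range M, ∑ d ∈ Finset.range N, g d w := by
  intro M
  induction M with
  | zero => simp
  | succ M ih =>
    have hsplit : N * (M + 1) = N * M + N := by ring
    rw [hsplit, Finset.sum_range_add, ih, Finset.sum_range_succ]
    congr 1
    apply Finset.sum_congr rfl
    intro j hj
    have hjN : j < N := Finset.mem_range.mp hj
    have h1 : (N * M + j) % N = j := by
      rw [Nat.mul_add_mod]
      exact Nat.mod_eq_of_lt hjN
    have h2 : (N * M + j) / N = M := by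
      rw [Nat.mul_add_div hN, Nat.div_eq_of_lt hjN, Nat.add_zero]
    rw [h1, h2]

theorem pvInnerSum (N m a b : ℕ) (h : m < N) :
    ∑ d ∈ Finset.range N, (if d < m then a else if d = m then b else 0) = m * a + b := by
  have hsplit : ∀ d : ℕ, (if d < m then a else if d = m then b else 0)
      = (if d < m then a else 0) + (if d = m then b else 0) := by
    intro d; split_ifs with h1 h2 <;> omega
  rw [Finset.sum_congr rfl (fun d _ => hsplit d), Finset.sum_add_distrib]
  congr 1
  · rw [Finset.sum_ite, Finset.sum_const, Finset.sum_const]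
    have : (Finset.range N).filter (fun d => d < m) = Finset.range m := by
      ext x; simp [Finset.mem_filter]; omega
    rw [this]; simp
  · rw [Finset.sum_ite_eq' (Finset.range N) m (fun _ => b)]
    simp [h]

theorem pvCnt_zero (N m : ℕ) : pvCnt N 0 m = 1 := by
  simp [pvCnt, pvSval, pvOfVal]

theorem pvCnt_succ (N i m : ℕ) (hN : 0 < N) (hm : m < N) :
    pvCnt N (i + 1) m = m * pvCnt N i m + pvCnt N i (m + 1) := by
  have hrw : ∀ (s : Finset ℕ) (p : ℕ → Bool), (s.filter (fun v => p v = true)).card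
      = ∑ v ∈ s, (if p v = true then 1 else 0) := by
    intro s p; rw [Finset.card_filter]
  rw [pvCnt, hrw]
  have hpow : N ^ (i + 1) = N * N ^ i := pow_succ' N i
  rw [hpow]
  have hstep : ∀ v : ℕ, (if pvSval m (pvOfVal N (i+1) v) = true then (1:ℕ) else 0)
      = (fun d w => if d < m then (if pvSval m (pvOfVal N i w) = true then (1:ℕ) else 0)
          else if d = m then (if pvSval (m+1) (pvOfVal N i w) = true then (1:ℕ) else 0) else 0)
          (v % N) (v / N) := by
    intro v
    have hvN : v % N < N := Nat.mod_lt v hN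
    have hov : pvOfVal N (i+1) v = (((v % N : ℕ) : ℤ) + 1) :: pvOfVal N i (v / N) := rfl
    rw [hov]
    simp only []
    by_cases hd : v % N < m
    · have hs : pvSval m ((((v % N : ℕ) : ℤ) + 1) :: pvOfVal N i (v / N))
          = pvSval m (pvOfVal N i (v / N)) := by
        simp only [pvSval]
        rw [if_pos (by constructor <;> omega)]
      rw [hs, if_pos hd]
    · by_cases hd2 : v % N = m
      · have hs : pvSval m ((((v % N : ℕ) : ℤ) + 1) :: pvOfVal N i (v / N))
            = pvSval (m+1) (pvOfVal N i (v / N)) := by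
          simp only [pvSval]
          rw [if_neg (by omega), if_pos (by omega)]
        rw [hs, if_neg hd, if_pos hd2]
      · have hs : pvSval m ((((v % N : ℕ) : ℤ) + 1) :: pvOfVal N i (v / N)) = false := by
          simp only [pvSval]
          rw [if_neg (by omega), if_neg (by omega)]
        rw [hs, if_neg hd, if_neg hd2]
        simp
  rw [Finset.sum_congr rfl (fun v _ => hstep v)]
  rw [pvBlockSum N hN (fun d w => if d < m then (if pvSval m (pvOfVal N i w) = true then (1:ℕ) else 0)
          else if d = m then (if pvSval (m+1) (pvOfVal N i w) = true then (1:ℕ) else 0) else 0) (N ^ i)]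
  have hinner : ∀ w ∈ Finset.range (N ^ i),
      ∑ d ∈ Finset.range N, (if d < m then (if pvSval m (pvOfVal N i w) = true then 1 else 0)
          else if d = m then (if pvSval (m+1) (pvOfVal N i w) = true then 1 else 0) else 0)
      = m * (if pvSval m (pvOfVal N i w) = true then 1 else 0)
        + (if pvSval (m+1) (pvOfVal N i w) = true then 1 else 0) := by
    intro w _
    exact pvInnerSum N m _ _ hm
  rw [Finset.sum_congr rfl hinner, Finset.sum_add_distrib, ← Finset.mul_sum]
  rw [pvCnt, pvCnt, hrw, hrw]

theorem pvCnt_eq_fb (N : ℕ) (hN : 0 < N) :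
    ∀ (i m : ℕ), i + m ≤ N → (pvCnt N i m : ℤ) = pvFB i m := by
  intro i
  induction i with
  | zero => intro m _; rw [pvCnt_zero]; rfl
  | succ i ih =>
    intro m hm
    rw [pvCnt_succ N i m hN (by omega), pvFB]
    push_cast
    rw [ih m (by omega), ih (m + 1) (by omega)]

def pvRowM (nn i : ℕ) : List Int := (List.range (nn - i)).map (fun m0 => pvFB i (m0 + 1))

theorem pvRowM_zero (nn : ℕ) : List.replicate nn (1 : ℤ) = pvRowM nn 0 := by
  apply List.ext_getElem
  · simp [pvRowM]
  · intro k h1 h2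
    simp [pvRowM, pvFB]

theorem pvStep (n : ℤ) (hn : 1 ≤ n) (k : ℕ) (hk : k < n.toNat - 1) :
    (PySem.List.pyRange 1 (n - (1 + (k : ℤ)) + 1) 1).map
      (fun m => m * (PySem.List.pyGetD (pvRowM n.toNat k) (m - 1) 0)
        + PySem.List.pyGetD (pvRowM n.toNat k) m 0)
    = pvRowM n.toNat (k + 1) := by
  set nn := n.toNat with hnn
  rw [PySem.List.pyRange_one]
  rw [show (n - (1 + (k : ℤ)) + 1 - 1).toNat = nn - (k + 1) by omega]
  rw [List.map_map]
  apply List.ext_getElem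
  · simp [pvRowM]
  · intro t h1 h2
    simp only [List.getElem_map, List.getElem_range, Function.comp_apply]
    have hlen : (pvRowM nn k).length = nn - k := by simp [pvRowM]
    have hlen1 : t < nn - (k + 1) := by simpa using h1
    have ht1 : t < nn - k := by omega
    have ht2 : t + 1 < nn - k := by omega
    have hg1 : PySem.List.pyGetD (pvRowM nn k) ((1 : ℤ) + (t : ℤ) - 1) 0 = pvFB k (t + 1) := by
      rw [show (1 : ℤ) + (t : ℤ) - 1 = ((t : ℕ) : ℤ) by push_cast; ring]
      rw [PySem.List.pyGetD_natCast]
      rw [List.getD_eq_getElem?_getD]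
      rw [List.getElem?_eq_getElem (by omega)]
      simp [pvRowM]
    have hg2 : PySem.List.pyGetD (pvRowM nn k) ((1 : ℤ) + (t : ℤ)) 0 = pvFB k (t + 2) := by
      rw [show (1 : ℤ) + (t : ℤ) = (((t + 1) : ℕ) : ℤ) by push_cast; ring]
      rw [PySem.List.pyGetD_natCast]
      rw [List.getD_eq_getElem?_getD]
      rw [List.getElem?_eq_getElem (by omega)]
      simp [pvRowM]
    rw [hg1, hg2]
    have hrhs : (pvRowM nn (k + 1))[t] = pvFB (k + 1) (t + 1) := by
      simp [pvRowM]
    rw [hrhs, pvFB]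
    push_cast
    ring

theorem pvBellRow_eq (n : ℤ) (hn : 1 ≤ n) : pvBellRow n = pvRowM n.toNat (n.toNat - 1) := by
  set nn := n.toNat with hnn
  rw [pvBellRow, PySem.List.pyRange_one]
  rw [show (n - 1).toNat = nn - 1 by omega]
  rw [List.foldl_map, pvRowM_zero]
  have key : ∀ j, j ≤ nn - 1 →
      List.foldl
        (fun row k =>
          (PySem.List.pyRange 1 (n - (1 + (k : ℕ) : ℤ) + 1) 1).map
            (fun m => m * (PySem.List.pyGetD row (m - 1) 0) + PySem.List.pyGetD row m 0))
        (pvRowM nn 0) (List.range j) = pvRowM nn j := by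
    intro j
    induction j with
    | zero => intro _; rfl
    | succ j ih =>
      intro hj
      rw [List.range_succ, List.foldl_append, ih (by omega)]
      simp only [List.foldl_cons, List.foldl_nil]
      exact pvStep n hn j (by omega)
  exact key (nn - 1) (le_refl _)

theorem pvBell_eq (n : ℤ) (hn : 1 ≤ n) : pvBell n = pvFB (n.toNat - 1) 1 := by
  rw [pvBell, pvBellRow_eq n hn]
  have h1 : 0 < n.toNat - (n.toNat - 1) := by omega
  rw [show (0 : ℤ) = ((0 : ℕ) : ℤ) by rfl, PySem.List.pyGetD_natCast]
  rw [List.getD_eq_getElem?_getD]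
  rw [List.getElem?_eq_getElem (by simp [pvRowM]; omega)]
  simp [pvRowM]

theorem pvWays_eq_bell (n : ℤ) (hn : 1 ≤ n) : pvWays n = pvBell n := by
  rw [pvWays_eq_cnt n hn, pvBell_eq n hn]
  set N := n.toNat with hN
  have hNpos : 0 < N := by omega
  obtain ⟨k, hk⟩ : ∃ k, N = k + 1 := ⟨N - 1, by omega⟩
  rw [pvCnt_eq_fb N hNpos N 0 (by omega), hk]
  rw [pvFB]
  rw [show k + 1 - 1 = k by omega]
  push_cast
  ring

theorem pvOuter (max : ℤ) :
    ∀ (d : ℕ) (k : ℤ), (max + 1 - k).toNat = d → 1 ≤ k → ∀ acc,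
      pvGoA max (PySem.List.pyRange k (max + 1) 1) acc = pvGoB max k acc := by
  intro d
  induction d using Nat.strong_induction_on with
  | _ d ih =>
    intro k hd hk acc
    by_cases hkm : k ≤ max
    · rw [PySem.List.pyRange_one_cons (by omega)]
      rw [pvGoA, pvGoB]
      rw [if_neg (by omega), if_pos hkm]
      simp only []
      rw [pvWays_eq_bell k hk]
      by_cases hw : pvBell k > max
      · rw [if_pos hw, if_pos hw]
      · rw [if_neg hw, if_neg hw]
        exact ih ((max + 1 - (k + 1)).toNat) (by omega) (k + 1) rfl (by omega) _
    · rw [PySem.List.pyRange_one_eq_nil (by omega)]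
      rw [pvGoA, pvGoB, if_neg hkm]

theorem pvFinal (max : ℤ) (h : Pre_generate_bell max) : generate_bell max = generate_bell_alt max := by
  rw [generate_bell, generate_bell_alt]
  rw [PySem.List.pyRange_one_cons (by unfold Pre_generate_bell at h; omega)]
  rw [pvGoA, if_pos (by omega)]
  exact pvOuter max (max.toNat - 1 + 1) 1 (by unfold Pre_generate_bell at h; omega) (by omega) []

-- ===== VERDICT (by name: the statement is the Claim_ definition above) =====
theorem generate_bell_spec : Claim_equal_generate_bell := by
  intro max _ hpre
  unfold Spec_generate_bell
  exact pvFinal max hpre
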